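-- pv_equiv track=rewrite | github.com/FewPila/bsa_demo | pages/corpviz_demo.py | highlighther2
-- ===== SOURCE A (Python) =====
-- def highlighther2(x_list):
--     v_list = []
--     for x in x_list:
--         if x > 75:
--             v = "background-color: #FF204E; color: white; font-weight: bold;"
--         elif x > 50:
--             v = "background-color: #A0153E; color: white; font-weight: bold;"
--         elif x > 15:
--             v = "background-color: #5D0E41; color: white; font-weight: bold;"
--         elif x > 0:
--             v = "background-color: #00224D; color: black; font-weight: bold;"
--         else:
--             v = "background-color: #00224D; color: black; font-weight: bold;"
--         v_list.append(v)
--     return v_list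
-- ===== SOURCE B (Python) =====
-- def highlighther2(x_list):
--     styles = [
--         "background-color: #00224D; color: black; font-weight: bold;",
--         "background-color: #5D0E41; color: white; font-weight: bold;",
--         "background-color: #A0153E; color: white; font-weight: bold;",
--         "background-color: #FF204E; color: white; font-weight: bold;",
--     ]
--     return [styles[(x > 15) + (x > 50) + (x > 75)] for x in x_list]
-- ===== Notes on version B (the rewrite author's own statement) =====
-- stated objective: idiomatic
-- what changed: Replaced the 5-way if/elif chain (whose last two branches are identical) by a 4-entry style table indexed by the count of exceeded thresholds, in a single comprehension.
import Mathlib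
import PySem

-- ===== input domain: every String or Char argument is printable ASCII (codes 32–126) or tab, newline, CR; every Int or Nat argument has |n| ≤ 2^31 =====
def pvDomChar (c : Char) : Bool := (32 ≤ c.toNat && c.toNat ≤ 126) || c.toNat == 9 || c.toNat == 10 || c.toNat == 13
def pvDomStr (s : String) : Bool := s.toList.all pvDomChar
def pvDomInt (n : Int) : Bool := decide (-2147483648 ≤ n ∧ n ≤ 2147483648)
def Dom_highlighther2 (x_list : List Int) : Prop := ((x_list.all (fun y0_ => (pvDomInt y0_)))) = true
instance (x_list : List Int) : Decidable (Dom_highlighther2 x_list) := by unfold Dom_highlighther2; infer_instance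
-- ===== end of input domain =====

-- B replaces A's 5-way if/elif chain (whose last two branches are identical) by a 4-entry style
-- table indexed by the count of exceeded thresholds, mapped over the list (idiomatic; same cost).


-- ===== PORT A =====
def highlighther2 (x_list : List Int) : List String :=
  x_list.foldl (fun v_list x =>
    let v :=
      if x > 75 then "background-color: #FF204E; color: white; font-weight: bold;"
      else if x > 50 then "background-color: #A0153E; color: white; font-weight: bold;"
      else if x > 15 then "background-color: #5D0E41; color: white; font-weight: bold;"
      else if x > 0 then "background-color: #00224D; color: black; font-weight: bold;"
      else "background-color: #00224D; color: black; font-weight: bold;"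
    v_list ++ [v]) []

-- ===== PORT B =====
def pvStyles : List String :=
  [ "background-color: #00224D; color: black; font-weight: bold;"
  , "background-color: #5D0E41; color: white; font-weight: bold;"
  , "background-color: #A0153E; color: white; font-weight: bold;"
  , "background-color: #FF204E; color: white; font-weight: bold;" ]

-- indexing is always in range (index ∈ [0,3], list length 4), so getD's default is never used
def highlighther2_alt (x_list : List Int) : List String :=
  x_list.map (fun x =>
    pvStyles.getD ((if x > 15 then 1 else 0) + (if x > 50 then 1 else 0) + (if x > 75 then 1 else 0)) "")

-- ===== PRECONDITION & SPEC =====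
def Spec_highlighther2 (x_list : List Int) (out : List String) : Prop := out = highlighther2_alt x_list
instance (x_list : List Int) (out : List String) : Decidable (Spec_highlighther2 x_list out) := by unfold Spec_highlighther2; infer_instance

-- ===== CLAIM (what is proved, stated in full; the proofs are below) =====
def Claim_equal_highlighther2 : Prop := ∀ (x_list : List Int), Dom_highlighther2 x_list → Spec_highlighther2 x_list (highlighther2 x_list)

-- ===== LEMMAS AND PROOFS =====
-- A's append-accumulator loop equals acc ++ per-element map
theorem highlighther2_foldl (x_list : List Int) (acc : List String) :
    x_list.foldl (fun v_list x =>
      let v :=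
        if x > 75 then "background-color: #FF204E; color: white; font-weight: bold;"
        else if x > 50 then "background-color: #A0153E; color: white; font-weight: bold;"
        else if x > 15 then "background-color: #5D0E41; color: white; font-weight: bold;"
        else if x > 0 then "background-color: #00224D; color: black; font-weight: bold;"
        else "background-color: #00224D; color: black; font-weight: bold;"
      v_list ++ [v]) acc
    = acc ++ x_list.map (fun x =>
        pvStyles.getD ((if x > 15 then 1 else 0) + (if x > 50 then 1 else 0) + (if x > 75 then 1 else 0)) "") := by
  induction x_list generalizing acc with
  | nil => simp
  | cons x xs ih =>
    simp only [List.foldl_cons, List.map_cons, ih]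
    rw [List.append_assoc]
    congr 2
    by_cases h75 : 75 < x
    · simp [pvStyles, h75, show (50:Int) < x by omega, show (15:Int) < x by omega]
    · by_cases h50 : 50 < x
      · simp [pvStyles, h75, h50, show (15:Int) < x by omega]
      · by_cases h15 : 15 < x
        · simp [pvStyles, h75, h50, h15]
        · by_cases h0 : 0 < x <;> simp [pvStyles, h75, h50, h15, h0]

theorem highlighther2_spec : Claim_equal_highlighther2 := by
  intro x_list _
  unfold Spec_highlighther2 highlighther2 highlighther2_alt
  rw [highlighther2_foldl x_list []]
  simp
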